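-- pv_equiv track=rewrite | github.com/Biergemg/AutWinmill | aut_windmill/f/einstein_kids/shared/zoom_integration.py | find_matching_lead
-- ===== SOURCE A (Python) =====
-- from typing import Dict, List, Any
--
-- def find_matching_lead(email: str, name: str, expected_leads: List) -> Dict[str, Any]:
--     """Encuentra el lead que corresponde al participante"""
--     # Buscar por email exacto
--     for lead in expected_leads:
--         if email and lead[1] and email.lower() == lead[1].lower():
--             return {
--                 'lead_id': lead[0],
--                 'email': lead[1],
--                 'phone': lead[2],
--                 'name': lead[3]
--             }
--
--     # Buscar por nombre aproximado
--     for lead in expected_leads: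
--         lead_name = lead[3].lower() if lead[3] else ''
--         participant_name = name.lower() if name else ''
--
--         if lead_name and participant_name:
--             # Coincidencia parcial
--             if lead_name in participant_name or participant_name in lead_name:
--                 return {
--                     'lead_id': lead[0],
--                     'email': lead[1],
--                     'phone': lead[2],
--                     'name': lead[3]
--                 }
--
--     return None
-- ===== SOURCE B (Python) =====
-- def find_matching_lead(email, name, expected_leads):
--     """Single pass: email match returns immediately; first name match is remembered."""
--     participant_name = name.lower() if name else ''
--     first_name_match = None
--     for lead in expected_leads:
--         if email and lead[1] and email.lower() == lead[1].lower():
--             return {'lead_id': lead[0], 'email': lead[1], 'phone': lead[2], 'name': lead[3]}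
--         if first_name_match is None:
--             lead_name = lead[3].lower() if lead[3] else ''
--             if lead_name and participant_name and (lead_name in participant_name or participant_name in lead_name):
--                 first_name_match = lead
--     if first_name_match is None:
--         return None
--     lead = first_name_match
--     return {'lead_id': lead[0], 'email': lead[1], 'phone': lead[2], 'name': lead[3]}
-- ===== Notes on version B (the rewrite author's own statement) =====
-- stated objective: alternative
-- what changed: B replaces A's two sequential scans (email pass, then name pass) by a single pass that returns immediately on an email match and remembers the first name match in one variable.
import Mathlib
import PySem

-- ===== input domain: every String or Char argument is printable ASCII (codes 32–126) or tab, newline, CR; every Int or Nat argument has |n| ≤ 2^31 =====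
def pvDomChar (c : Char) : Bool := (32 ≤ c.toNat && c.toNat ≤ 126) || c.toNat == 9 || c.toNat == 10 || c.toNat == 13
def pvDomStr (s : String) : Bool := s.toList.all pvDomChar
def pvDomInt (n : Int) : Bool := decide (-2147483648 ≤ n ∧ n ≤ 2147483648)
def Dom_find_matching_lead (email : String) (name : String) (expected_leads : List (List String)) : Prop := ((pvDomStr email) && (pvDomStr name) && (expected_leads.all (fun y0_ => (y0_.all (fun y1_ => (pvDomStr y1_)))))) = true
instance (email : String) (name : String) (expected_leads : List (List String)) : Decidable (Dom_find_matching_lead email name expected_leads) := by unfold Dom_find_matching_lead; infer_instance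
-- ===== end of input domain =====

-- B makes one pass (email match returns at once, first name match is remembered)
-- instead of A's two sequential scans; same cost, different decomposition.

-- lead[i] for i = 0..3; exact under Pre_ (every lead has ≥ 4 fields, so the index is in range)
def leadGet (lead : List String) (i : Nat) : String := (PySem.List.pyGet? lead (Int.ofNat i)).getD ""

-- the dict literal {'lead_id': lead[0], 'email': lead[1], 'phone': lead[2], 'name': lead[3]}
def mkLeadDict (lead : List String) : List (String × String) :=
  [("lead_id", leadGet lead 0), ("email", leadGet lead 1),
   ("phone", leadGet lead 2), ("name", leadGet lead 3)]

-- ===== PORT A =====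
-- first loop of A: search by exact (case-insensitive) email
def findByEmail (email : String) : List (List String) → Option (List (String × String))
  | [] => none
  | lead :: rest =>
    if email ≠ "" ∧ leadGet lead 1 ≠ "" ∧ PySem.Str.lower email = PySem.Str.lower (leadGet lead 1)
    then some (mkLeadDict lead)
    else findByEmail email rest

-- second loop of A: search by partial name
def findByName (name : String) : List (List String) → Option (List (String × String))
  | [] => none
  | lead :: rest =>
    -- lead_name / participant_name inlined (lead_name = lead[3].lower() if lead[3] else '', etc.)
    if (if leadGet lead 3 ≠ "" then PySem.Str.lower (leadGet lead 3) else "") ≠ "" ∧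
       (if name ≠ "" then PySem.Str.lower name else "") ≠ "" ∧
       (PySem.Str.isIn (if leadGet lead 3 ≠ "" then PySem.Str.lower (leadGet lead 3) else "")
           (if name ≠ "" then PySem.Str.lower name else "") ∨
        PySem.Str.isIn (if name ≠ "" then PySem.Str.lower name else "")
           (if leadGet lead 3 ≠ "" then PySem.Str.lower (leadGet lead 3) else ""))
    then some (mkLeadDict lead)
    else findByName name rest

def find_matching_lead (email : String) (name : String) (expected_leads : List (List String)) : Option (List (String × String)) :=
  match findByEmail email expected_leads with
  | some d => some d
  | none => findByName name expected_leads

-- ===== PORT B =====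
-- B's single loop: `first_name_match` is the accumulator
def altLoop (email : String) (participant_name : String) (first_name_match : Option (List String)) :
    List (List String) → Option (List (String × String))
  | [] =>
    match first_name_match with
    | some lead => some (mkLeadDict lead)
    | none => none
  | lead :: rest =>
    if email ≠ "" ∧ leadGet lead 1 ≠ "" ∧ PySem.Str.lower email = PySem.Str.lower (leadGet lead 1)
    then some (mkLeadDict lead)
    else
      altLoop email participant_name
        (match first_name_match with
         | some l => some l
         | none =>
           if (if leadGet lead 3 ≠ "" then PySem.Str.lower (leadGet lead 3) else "") ≠ "" ∧
              participant_name ≠ "" ∧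
              (PySem.Str.isIn (if leadGet lead 3 ≠ "" then PySem.Str.lower (leadGet lead 3) else "") participant_name ∨
               PySem.Str.isIn participant_name (if leadGet lead 3 ≠ "" then PySem.Str.lower (leadGet lead 3) else ""))
           then some lead else none) rest

def find_matching_lead_alt (email : String) (name : String) (expected_leads : List (List String)) : Option (List (String × String)) :=
  let participant_name := if name ≠ "" then PySem.Str.lower name else ""
  altLoop email participant_name none expected_leads

-- ===== PRECONDITION & SPEC =====
-- Pre_ excludes lists containing a lead with fewer than 4 fields: A raises IndexError when a
-- loop reaches such a lead (it can still return first via an earlier email match — see cites).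
def Pre_find_matching_lead (email : String) (name : String) (expected_leads : List (List String)) : Prop :=
  ∀ lead ∈ expected_leads, 4 ≤ lead.length
instance (email : String) (name : String) (expected_leads : List (List String)) : Decidable (Pre_find_matching_lead email name expected_leads) := by unfold Pre_find_matching_lead; infer_instance

def pvWitness_find_matching_lead : String × String × List (List String) :=
  ("a@b.c", "Jo", [["1", "a@b.c", "555", "John"]])

def Spec_find_matching_lead (email : String) (name : String) (expected_leads : List (List String)) (out : Option (List (String × String))) : Prop := out = find_matching_lead_alt email name expected_leads
instance (email : String) (name : String) (expected_leads : List (List String)) (out : Option (List (String × String))) : Decidable (Spec_find_matching_lead email name expected_leads out) := by unfold Spec_find_matching_lead; infer_instance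

-- ===== CLAIM (what is proved, stated in full; the proofs are below) =====
def Claim_equal_find_matching_lead : Prop := ∀ (email : String) (name : String) (expected_leads : List (List String)), Dom_find_matching_lead email name expected_leads → Pre_find_matching_lead email name expected_leads → Spec_find_matching_lead email name expected_leads (find_matching_lead email name expected_leads)

-- ===== LEMMAS AND PROOFS =====

-- loop invariant: B's single pass equals A's email scan with A's name scan (seeded by the
-- remembered first name match) as fallback
theorem altLoop_eq (email name : String) (leads : List (List String)) :
    ∀ fnm : Option (List String),
      altLoop email (if name ≠ "" then PySem.Str.lower name else "") fnm leads =
        match findByEmail email leads with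
        | some d => some d
        | none =>
          match fnm with
          | some l => some (mkLeadDict l)
          | none => findByName name leads := by
  induction leads with
  | nil => intro fnm; cases fnm <;> rfl
  | cons lead rest ih =>
    intro fnm
    by_cases he : email ≠ "" ∧ leadGet lead 1 ≠ "" ∧ PySem.Str.lower email = PySem.Str.lower (leadGet lead 1)
    · simp only [altLoop, findByEmail, if_pos he]
    · simp only [altLoop, findByEmail, if_neg he]
      cases fnm with
      | some l =>
        rw [ih (some l)]
      | none =>
        by_cases hn : (if leadGet lead 3 ≠ "" then PySem.Str.lower (leadGet lead 3) else "") ≠ "" ∧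
            (if name ≠ "" then PySem.Str.lower name else "") ≠ "" ∧
            (PySem.Str.isIn (if leadGet lead 3 ≠ "" then PySem.Str.lower (leadGet lead 3) else "")
                (if name ≠ "" then PySem.Str.lower name else "") ∨
             PySem.Str.isIn (if name ≠ "" then PySem.Str.lower name else "")
                (if leadGet lead 3 ≠ "" then PySem.Str.lower (leadGet lead 3) else ""))
        · rw [if_pos hn, ih (some lead)]
          simp only [findByName, if_pos hn]
        · rw [if_neg hn, ih none]
          simp only [findByName, if_neg hn]

-- ===== VERDICT (by name: the statement is the Claim_ definition above) =====
theorem find_matching_lead_spec : Claim_equal_find_matching_lead := by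
  intro email name leads _ _
  unfold Spec_find_matching_lead find_matching_lead find_matching_lead_alt
  rw [altLoop_eq]
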